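-- pv_equiv track=rewrite | github.com/taaha-0548/BugYou | backend/enhanced_error_handler.py | categorize_runtime_error
-- ===== SOURCE A (Python) =====
-- def categorize_runtime_error(error_message, language):
--     """Categorize and provide helpful messages for runtime errors"""
--     error_message = error_message.lower().strip()
--
--     # Index/Array out of bounds
--     if any(keyword in error_message for keyword in ['index', 'out of bounds', 'out of range', 'indexerror']):
--         return {
--             'category': 'INDEX_OUT_OF_BOUNDS',
--             'user_message': 'Index Error: Trying to access an array element that doesn\'t exist.',
--             'helpful_tip': 'Check array bounds: make sure index < array.length and index >= 0',
--             'severity': 'RUNTIME',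
--             'debugging_suggestion': 'Add bounds checking: if (index >= 0 && index < array.length)'
--         }
--
--     # Null pointer/None reference
--     if any(keyword in error_message for keyword in ['null', 'none', 'nullpointer', 'nonetype']):
--         return {
--             'category': 'NULL_REFERENCE',
--             'user_message': 'Null Reference Error: Trying to use a variable that is null/None.',
--             'helpful_tip': 'Check if variables are properly initialized before using them',
--             'severity': 'RUNTIME',
--             'debugging_suggestion': 'Add null checks: if (variable != null) or if variable is not None'
--         }
--
--     # Division by zero
--     if 'division' in error_message and 'zero' in error_message:
--         return {
--             'category': 'DIVISION_BY_ZERO',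
--             'user_message': 'Division by Zero Error: Cannot divide by zero.',
--             'helpful_tip': 'Add a check to ensure the divisor is not zero before division',
--             'severity': 'RUNTIME',
--             'debugging_suggestion': 'Add check: if (divisor != 0) before division'
--         }
--
--     # Type errors
--     if 'type' in error_message and any(keyword in error_message for keyword in ['error', 'mismatch']):
--         return {
--             'category': 'TYPE_ERROR',
--             'user_message': 'Type Error: Incorrect data type usage.',
--             'helpful_tip': 'Check that you\'re using the correct data types (int, string, list, etc.)',
--             'severity': 'RUNTIME',
--             'debugging_suggestion': 'Verify variable types and casting operations'
--         }
--
--     # Stack overflow (infinite recursion)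
--     if any(keyword in error_message for keyword in ['stack overflow', 'maximum recursion', 'stack space']):
--         return {
--             'category': 'STACK_OVERFLOW',
--             'user_message': 'Stack Overflow: Infinite recursion or too many nested function calls.',
--             'helpful_tip': 'Check recursive functions for proper base cases',
--             'severity': 'RUNTIME',
--             'debugging_suggestion': 'Ensure recursive functions have valid stopping conditions'
--         }
--
--     # Memory errors
--     if any(keyword in error_message for keyword in ['memory', 'allocation', 'segmentation']):
--         return {
--             'category': 'MEMORY_ERROR',
--             'user_message': 'Memory Error: Invalid memory access or allocation failure.',
--             'helpful_tip': 'Check array bounds and pointer usage',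
--             'severity': 'RUNTIME',
--             'debugging_suggestion': 'Review pointer operations and array access patterns'
--         }
--
--     # Generic runtime error
--     return {
--         'category': 'RUNTIME_ERROR',
--         'user_message': 'Runtime Error: An error occurred while executing your code.',
--         'helpful_tip': 'Check your logic and ensure all variables are properly initialized',
--         'severity': 'RUNTIME',
--         'raw_error': error_message
--     }
-- ===== SOURCE B (Python) =====
-- _TABLE = [
--     (('index',), 0), (('out of bounds',), 0), (('out of range',), 0), (('indexerror',), 0),
--     (('null',), 1), (('none',), 1), (('nullpointer',), 1), (('nonetype',), 1),
--     (('division', 'zero'), 2),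
--     (('type', 'error'), 3), (('type', 'mismatch'), 3),
--     (('stack overflow',), 4), (('maximum recursion',), 4), (('stack space',), 4),
--     (('memory',), 5), (('allocation',), 5), (('segmentation',), 5),
-- ]
--
-- _RESULTS = [
--     {
--         'category': 'INDEX_OUT_OF_BOUNDS',
--         'user_message': 'Index Error: Trying to access an array element that doesn\'t exist.',
--         'helpful_tip': 'Check array bounds: make sure index < array.length and index >= 0',
--         'severity': 'RUNTIME',
--         'debugging_suggestion': 'Add bounds checking: if (index >= 0 && index < array.length)'
--     },
--     {
--         'category': 'NULL_REFERENCE',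
--         'user_message': 'Null Reference Error: Trying to use a variable that is null/None.',
--         'helpful_tip': 'Check if variables are properly initialized before using them',
--         'severity': 'RUNTIME',
--         'debugging_suggestion': 'Add null checks: if (variable != null) or if variable is not None'
--     },
--     {
--         'category': 'DIVISION_BY_ZERO',
--         'user_message': 'Division by Zero Error: Cannot divide by zero.',
--         'helpful_tip': 'Add a check to ensure the divisor is not zero before division',
--         'severity': 'RUNTIME',
--         'debugging_suggestion': 'Add check: if (divisor != 0) before division'
--     },
--     {
--         'category': 'TYPE_ERROR',
--         'user_message': 'Type Error: Incorrect data type usage.',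
--         'helpful_tip': 'Check that you\'re using the correct data types (int, string, list, etc.)',
--         'severity': 'RUNTIME',
--         'debugging_suggestion': 'Verify variable types and casting operations'
--     },
--     {
--         'category': 'STACK_OVERFLOW',
--         'user_message': 'Stack Overflow: Infinite recursion or too many nested function calls.',
--         'helpful_tip': 'Check recursive functions for proper base cases',
--         'severity': 'RUNTIME',
--         'debugging_suggestion': 'Ensure recursive functions have valid stopping conditions'
--     },
--     {
--         'category': 'MEMORY_ERROR',
--         'user_message': 'Memory Error: Invalid memory access or allocation failure.',
--         'helpful_tip': 'Check array bounds and pointer usage',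
--         'severity': 'RUNTIME',
--         'debugging_suggestion': 'Review pointer operations and array access patterns'
--     },
-- ]
--
--
-- def categorize_runtime_error(error_message, language):
--     """Categorize a runtime error by scoring every keyword hit and keeping the
--     best (lowest) priority, then indexing a results table; priorities encode
--     the intended precedence of the categories."""
--     msg = error_message.lower().strip()
--
--     best = 6
--     for needles, pri in _TABLE:
--         if all(n in msg for n in needles):
--             best = min(best, pri)
--
--     if best < 6:
--         return _RESULTS[best]
--
--     return {
--         'category': 'RUNTIME_ERROR',
--         'user_message': 'Runtime Error: An error occurred while executing your code.',
--         'helpful_tip': 'Check your logic and ensure all variables are properly initialized',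
--         'severity': 'RUNTIME',
--         'raw_error': msg
--     }
-- ===== Notes on version B (the rewrite author's own statement) =====
-- stated objective: alternative
-- what changed: B flattens all keywords into one (required-substrings, priority) table, folds over it once keeping the minimum matching priority, and indexes a results array by that priority, instead of A's ordered if-return cascade of per-category predicates.
import Mathlib
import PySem

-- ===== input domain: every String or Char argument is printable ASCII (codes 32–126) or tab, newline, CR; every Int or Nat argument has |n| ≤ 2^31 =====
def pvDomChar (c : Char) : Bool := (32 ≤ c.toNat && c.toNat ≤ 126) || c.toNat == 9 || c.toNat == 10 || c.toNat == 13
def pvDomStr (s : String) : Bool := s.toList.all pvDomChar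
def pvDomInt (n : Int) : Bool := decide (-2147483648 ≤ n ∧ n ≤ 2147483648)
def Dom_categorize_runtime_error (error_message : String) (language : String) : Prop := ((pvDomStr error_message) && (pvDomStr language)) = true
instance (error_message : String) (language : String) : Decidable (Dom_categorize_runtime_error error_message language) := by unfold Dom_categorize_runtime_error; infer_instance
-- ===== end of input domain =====

-- B replaces A's ordered first-match predicate cascade by a single fold over a flat keyword table
-- that keeps the minimum matching priority, then indexes a results array (alternative, same cost).

-- ===== PORT A =====
-- literal transliteration of A: normalize, then an if-return chain in source order
def categorize_runtime_error (error_message : String) (language : String) : List (String × String) :=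
  let em := PySem.Str.strip (PySem.Str.lower error_message)
  if (["index", "out of bounds", "out of range", "indexerror"].any (fun k => PySem.Str.isIn k em)) then
    [("category", "INDEX_OUT_OF_BOUNDS"),
     ("user_message", "Index Error: Trying to access an array element that doesn't exist."),
     ("helpful_tip", "Check array bounds: make sure index < array.length and index >= 0"),
     ("severity", "RUNTIME"),
     ("debugging_suggestion", "Add bounds checking: if (index >= 0 && index < array.length)")]
  else if (["null", "none", "nullpointer", "nonetype"].any (fun k => PySem.Str.isIn k em)) then
    [("category", "NULL_REFERENCE"),
     ("user_message", "Null Reference Error: Trying to use a variable that is null/None."),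
     ("helpful_tip", "Check if variables are properly initialized before using them"),
     ("severity", "RUNTIME"),
     ("debugging_suggestion", "Add null checks: if (variable != null) or if variable is not None")]
  else if (PySem.Str.isIn "division" em && PySem.Str.isIn "zero" em) then
    [("category", "DIVISION_BY_ZERO"),
     ("user_message", "Division by Zero Error: Cannot divide by zero."),
     ("helpful_tip", "Add a check to ensure the divisor is not zero before division"),
     ("severity", "RUNTIME"),
     ("debugging_suggestion", "Add check: if (divisor != 0) before division")]
  else if (PySem.Str.isIn "type" em && ["error", "mismatch"].any (fun k => PySem.Str.isIn k em)) then
    [("category", "TYPE_ERROR"),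
     ("user_message", "Type Error: Incorrect data type usage."),
     ("helpful_tip", "Check that you're using the correct data types (int, string, list, etc.)"),
     ("severity", "RUNTIME"),
     ("debugging_suggestion", "Verify variable types and casting operations")]
  else if (["stack overflow", "maximum recursion", "stack space"].any (fun k => PySem.Str.isIn k em)) then
    [("category", "STACK_OVERFLOW"),
     ("user_message", "Stack Overflow: Infinite recursion or too many nested function calls."),
     ("helpful_tip", "Check recursive functions for proper base cases"),
     ("severity", "RUNTIME"),
     ("debugging_suggestion", "Ensure recursive functions have valid stopping conditions")]
  else if (["memory", "allocation", "segmentation"].any (fun k => PySem.Str.isIn k em)) then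
    [("category", "MEMORY_ERROR"),
     ("user_message", "Memory Error: Invalid memory access or allocation failure."),
     ("helpful_tip", "Check array bounds and pointer usage"),
     ("severity", "RUNTIME"),
     ("debugging_suggestion", "Review pointer operations and array access patterns")]
  else
    [("category", "RUNTIME_ERROR"),
     ("user_message", "Runtime Error: An error occurred while executing your code."),
     ("helpful_tip", "Check your logic and ensure all variables are properly initialized"),
     ("severity", "RUNTIME"),
     ("raw_error", em)]

-- ===== PORT B =====
-- Source B's flat keyword table: (required substrings, priority)
def pvTable : List (List String × Nat) :=
  [(["index"], 0), (["out of bounds"], 0), (["out of range"], 0), (["indexerror"], 0),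
   (["null"], 1), (["none"], 1), (["nullpointer"], 1), (["nonetype"], 1),
   (["division", "zero"], 2),
   (["type", "error"], 3), (["type", "mismatch"], 3),
   (["stack overflow"], 4), (["maximum recursion"], 4), (["stack space"], 4),
   (["memory"], 5), (["allocation"], 5), (["segmentation"], 5)]

-- Source B's _RESULTS array, in priority order
def pvResults : List (List (String × String)) :=
  [[("category", "INDEX_OUT_OF_BOUNDS"),
    ("user_message", "Index Error: Trying to access an array element that doesn't exist."),
    ("helpful_tip", "Check array bounds: make sure index < array.length and index >= 0"),
    ("severity", "RUNTIME"),
    ("debugging_suggestion", "Add bounds checking: if (index >= 0 && index < array.length)")],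
   [("category", "NULL_REFERENCE"),
    ("user_message", "Null Reference Error: Trying to use a variable that is null/None."),
    ("helpful_tip", "Check if variables are properly initialized before using them"),
    ("severity", "RUNTIME"),
    ("debugging_suggestion", "Add null checks: if (variable != null) or if variable is not None")],
   [("category", "DIVISION_BY_ZERO"),
    ("user_message", "Division by Zero Error: Cannot divide by zero."),
    ("helpful_tip", "Add a check to ensure the divisor is not zero before division"),
    ("severity", "RUNTIME"),
    ("debugging_suggestion", "Add check: if (divisor != 0) before division")],
   [("category", "TYPE_ERROR"),
    ("user_message", "Type Error: Incorrect data type usage."),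
    ("helpful_tip", "Check that you're using the correct data types (int, string, list, etc.)"),
    ("severity", "RUNTIME"),
    ("debugging_suggestion", "Verify variable types and casting operations")],
   [("category", "STACK_OVERFLOW"),
    ("user_message", "Stack Overflow: Infinite recursion or too many nested function calls."),
    ("helpful_tip", "Check recursive functions for proper base cases"),
    ("severity", "RUNTIME"),
    ("debugging_suggestion", "Ensure recursive functions have valid stopping conditions")],
   [("category", "MEMORY_ERROR"),
    ("user_message", "Memory Error: Invalid memory access or allocation failure."),
    ("helpful_tip", "Check array bounds and pointer usage"),
    ("severity", "RUNTIME"),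
    ("debugging_suggestion", "Review pointer operations and array access patterns")]]

-- one step of Source B's loop: keep the minimum priority among matching entries
def pvStep (m : String) (best : Nat) (e : List String × Nat) : Nat :=
  if e.1.all (fun n => PySem.Str.isIn n m) then min best e.2 else best

def categorize_runtime_error_alt (error_message : String) (language : String) : List (String × String) :=
  let msg := PySem.Str.strip (PySem.Str.lower error_message)
  let best := pvTable.foldl (pvStep msg) 6
  if best < 6 then
    -- _RESULTS[best]: exact since the guard gives 0 ≤ best < 6 = len(_RESULTS)
    pvResults.getD best []
  else
    [("category", "RUNTIME_ERROR"),
     ("user_message", "Runtime Error: An error occurred while executing your code."),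
     ("helpful_tip", "Check your logic and ensure all variables are properly initialized"),
     ("severity", "RUNTIME"),
     ("raw_error", msg)]

-- ===== PRECONDITION & SPEC =====
def Spec_categorize_runtime_error (error_message : String) (language : String) (out : List (String × String)) : Prop := out = categorize_runtime_error_alt error_message language
instance (error_message : String) (language : String) (out : List (String × String)) : Decidable (Spec_categorize_runtime_error error_message language out) := by unfold Spec_categorize_runtime_error; infer_instance

-- ===== CLAIM =====
def Claim_equal_categorize_runtime_error : Prop := ∀ (error_message : String) (language : String), Dom_categorize_runtime_error error_message language → Spec_categorize_runtime_error error_message language (categorize_runtime_error error_message language)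

-- ===== LEMMAS AND PROOFS =====

-- pvTable split into its equal-priority segments (definitional)
theorem pvTable_split : pvTable =
    [(["index"], 0), (["out of bounds"], 0), (["out of range"], 0), (["indexerror"], 0)] ++
    [(["null"], 1), (["none"], 1), (["nullpointer"], 1), (["nonetype"], 1)] ++
    [(["division", "zero"], 2)] ++
    [(["type", "error"], 3), (["type", "mismatch"], 3)] ++
    [(["stack overflow"], 4), (["maximum recursion"], 4), (["stack space"], 4)] ++
    [(["memory"], 5), (["allocation"], 5), (["segmentation"], 5)] := rfl

-- each segment's fold contributes 'min b p' exactly when A's condition for that group holds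
theorem fg0 (m : String) (b : Nat) :
    List.foldl (pvStep m) b [(["index"], 0), (["out of bounds"], 0), (["out of range"], 0), (["indexerror"], 0)] =
      if ["index", "out of bounds", "out of range", "indexerror"].any (fun k => PySem.Str.isIn k m) then min b 0 else b := by
  rcases Bool.eq_false_or_eq_true (PySem.Str.isIn "index" m) with h1 | h1 <;>
  rcases Bool.eq_false_or_eq_true (PySem.Str.isIn "out of bounds" m) with h2 | h2 <;>
  rcases Bool.eq_false_or_eq_true (PySem.Str.isIn "out of range" m) with h3 | h3 <;>
  rcases Bool.eq_false_or_eq_true (PySem.Str.isIn "indexerror" m) with h4 | h4 <;>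
  simp only [List.foldl, pvStep, List.all_cons, List.all_nil, List.any_cons, List.any_nil,
    Bool.and_true, Bool.or_false, h1, h2, h3, h4] <;> simp

theorem fg1 (m : String) (b : Nat) :
    List.foldl (pvStep m) b [(["null"], 1), (["none"], 1), (["nullpointer"], 1), (["nonetype"], 1)] =
      if ["null", "none", "nullpointer", "nonetype"].any (fun k => PySem.Str.isIn k m) then min b 1 else b := by
  rcases Bool.eq_false_or_eq_true (PySem.Str.isIn "null" m) with h1 | h1 <;>
  rcases Bool.eq_false_or_eq_true (PySem.Str.isIn "none" m) with h2 | h2 <;>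
  rcases Bool.eq_false_or_eq_true (PySem.Str.isIn "nullpointer" m) with h3 | h3 <;>
  rcases Bool.eq_false_or_eq_true (PySem.Str.isIn "nonetype" m) with h4 | h4 <;>
  simp only [List.foldl, pvStep, List.all_cons, List.all_nil, List.any_cons, List.any_nil,
    Bool.and_true, Bool.or_false, h1, h2, h3, h4] <;> simp

theorem fg2 (m : String) (b : Nat) :
    List.foldl (pvStep m) b [(["division", "zero"], 2)] =
      if PySem.Str.isIn "division" m && PySem.Str.isIn "zero" m then min b 2 else b := by
  simp [List.foldl, pvStep]

theorem fg3 (m : String) (b : Nat) :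
    List.foldl (pvStep m) b [(["type", "error"], 3), (["type", "mismatch"], 3)] =
      if PySem.Str.isIn "type" m && ["error", "mismatch"].any (fun k => PySem.Str.isIn k m) then min b 3 else b := by
  rcases Bool.eq_false_or_eq_true (PySem.Str.isIn "type" m) with h1 | h1 <;>
  rcases Bool.eq_false_or_eq_true (PySem.Str.isIn "error" m) with h2 | h2 <;>
  rcases Bool.eq_false_or_eq_true (PySem.Str.isIn "mismatch" m) with h3 | h3 <;>
  simp only [List.foldl, pvStep, List.all_cons, List.all_nil, List.any_cons, List.any_nil,
    Bool.and_true, Bool.or_false, Bool.true_and, Bool.false_and, h1, h2, h3] <;> simp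

theorem fg4 (m : String) (b : Nat) :
    List.foldl (pvStep m) b [(["stack overflow"], 4), (["maximum recursion"], 4), (["stack space"], 4)] =
      if ["stack overflow", "maximum recursion", "stack space"].any (fun k => PySem.Str.isIn k m) then min b 4 else b := by
  rcases Bool.eq_false_or_eq_true (PySem.Str.isIn "stack overflow" m) with h1 | h1 <;>
  rcases Bool.eq_false_or_eq_true (PySem.Str.isIn "maximum recursion" m) with h2 | h2 <;>
  rcases Bool.eq_false_or_eq_true (PySem.Str.isIn "stack space" m) with h3 | h3 <;>
  simp only [List.foldl, pvStep, List.all_cons, List.all_nil, List.any_cons, List.any_nil,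
    Bool.and_true, Bool.or_false, h1, h2, h3] <;> simp

theorem fg5 (m : String) (b : Nat) :
    List.foldl (pvStep m) b [(["memory"], 5), (["allocation"], 5), (["segmentation"], 5)] =
      if ["memory", "allocation", "segmentation"].any (fun k => PySem.Str.isIn k m) then min b 5 else b := by
  rcases Bool.eq_false_or_eq_true (PySem.Str.isIn "memory" m) with h1 | h1 <;>
  rcases Bool.eq_false_or_eq_true (PySem.Str.isIn "allocation" m) with h2 | h2 <;>
  rcases Bool.eq_false_or_eq_true (PySem.Str.isIn "segmentation" m) with h3 | h3 <;>
  simp only [List.foldl, pvStep, List.all_cons, List.all_nil, List.any_cons, List.any_nil,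
    Bool.and_true, Bool.or_false, h1, h2, h3] <;> simp

theorem categorize_eq (error_message language : String) :
    categorize_runtime_error error_message language = categorize_runtime_error_alt error_message language := by
  unfold categorize_runtime_error categorize_runtime_error_alt
  simp only [pvTable_split, List.foldl_append, fg0, fg1, fg2, fg3, fg4, fg5]
  generalize (PySem.Str.strip (PySem.Str.lower error_message)) = m
  rcases Bool.eq_false_or_eq_true (["index", "out of bounds", "out of range", "indexerror"].any (fun k => PySem.Str.isIn k m)) with h1 | h1 <;>
  rcases Bool.eq_false_or_eq_true (["null", "none", "nullpointer", "nonetype"].any (fun k => PySem.Str.isIn k m)) with h2 | h2 <;>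
  rcases Bool.eq_false_or_eq_true (PySem.Str.isIn "division" m && PySem.Str.isIn "zero" m) with h3 | h3 <;>
  rcases Bool.eq_false_or_eq_true (PySem.Str.isIn "type" m && ["error", "mismatch"].any (fun k => PySem.Str.isIn k m)) with h4 | h4 <;>
  rcases Bool.eq_false_or_eq_true (["stack overflow", "maximum recursion", "stack space"].any (fun k => PySem.Str.isIn k m)) with h5 | h5 <;>
  rcases Bool.eq_false_or_eq_true (["memory", "allocation", "segmentation"].any (fun k => PySem.Str.isIn k m)) with h6 | h6 <;>
  simp only [h1, h2, h3, h4, h5, h6] <;> simp [pvResults]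

-- ===== VERDICT =====
theorem categorize_runtime_error_spec : Claim_equal_categorize_runtime_error := by
  intro em lang _
  unfold Spec_categorize_runtime_error
  exact categorize_eq em lang
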